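-- pv_equiv track=rewrite | github.com/Urwa614/ai-project | backend/app.py | generate_career_recommendation
-- ===== SOURCE A (Python) =====
-- def generate_career_recommendation(skills, interests):
--     skills_lower = skills.lower()
--     interests_lower = interests.lower()
--
--     tech_keywords = ['programming', 'coding', 'developer', 'software', 'web', 'app', 'python', 'javascript', 'java', 'c++', 'react', 'node']
--     design_keywords = ['design', 'ui', 'ux', 'graphic', 'creative', 'art', 'drawing', 'photoshop', 'illustrator', 'sketch']
--     data_keywords = ['data', 'analysis', 'analytics', 'statistics', 'math', 'excel', 'sql', 'database', 'visualization', 'tableau', 'bi']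
--     marketing_keywords = ['marketing', 'social media', 'content', 'writing', 'seo', 'advertising', 'brand', 'communication']
--     finance_keywords = ['finance', 'accounting', 'economics', 'investment', 'banking', 'stock', 'market', 'business']
--
--     # Count keyword matches
--     tech_score = sum(1 for keyword in tech_keywords if keyword in skills_lower or keyword in interests_lower)
--     design_score = sum(1 for keyword in design_keywords if keyword in skills_lower or keyword in interests_lower)
--     data_score = sum(1 for keyword in data_keywords if keyword in skills_lower or keyword in interests_lower)
--     marketing_score = sum(1 for keyword in marketing_keywords if keyword in skills_lower or keyword in interests_lower)
--     finance_score = sum(1 for keyword in finance_keywords if keyword in skills_lower or keyword in interests_lower)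
--
--     # Find the highest score
--     scores = {
--         'tech': tech_score,
--         'design': design_score,
--         'data': data_score,
--         'marketing': marketing_score,
--         'finance': finance_score
--     }
--
--     max_category = max(scores, key=scores.get)
--
--     # Generate recommendation based on the highest scoring category
--     recommendations = {
--         'tech': 'Based on your skills and interests, you would excel in Software Development. Consider focusing on full-stack development to leverage your technical abilities.',
--         'design': 'Your creative skills suggest you would thrive in UX/UI Design. Consider building a portfolio showcasing your design thinking and visual communication skills.',
--         'data': 'Your analytical mindset makes Data Science an excellent career path. Consider developing expertise in machine learning and data visualization tools.',
--         'marketing': 'Your communication skills align well with Digital Marketing. Consider specializing in content strategy or social media management.',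
--         'finance': 'Your aptitude for numbers suggests a promising career in Financial Analysis. Consider pursuing certifications in financial planning or investment analysis.'
--     }
--
--     # If no clear match, provide a general recommendation
--     if scores[max_category] == 0:
--         return 'Based on your profile, consider exploring various fields to discover your passion. Start with short courses in different areas to find what resonates with you.'
--
--     return recommendations[max_category]
-- ===== SOURCE B (Python) =====
-- REC_TECH = 'Based on your skills and interests, you would excel in Software Development. Consider focusing on full-stack development to leverage your technical abilities.'
-- REC_DESIGN = 'Your creative skills suggest you would thrive in UX/UI Design. Consider building a portfolio showcasing your design thinking and visual communication skills.'
-- REC_DATA = 'Your analytical mindset makes Data Science an excellent career path. Consider developing expertise in machine learning and data visualization tools.'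
-- REC_MARKETING = 'Your communication skills align well with Digital Marketing. Consider specializing in content strategy or social media management.'
-- REC_FINANCE = 'Your aptitude for numbers suggests a promising career in Financial Analysis. Consider pursuing certifications in financial planning or investment analysis.'
-- REC_GENERIC = 'Based on your profile, consider exploring various fields to discover your passion. Start with short courses in different areas to find what resonates with you.'
--
-- # One flat keyword -> recommendation map (all 49 keywords are distinct).
-- KEYWORD_REC = {
--     'programming': REC_TECH, 'coding': REC_TECH, 'developer': REC_TECH,
--     'software': REC_TECH, 'web': REC_TECH, 'app': REC_TECH, 'python': REC_TECH,
--     'javascript': REC_TECH, 'java': REC_TECH, 'c++': REC_TECH, 'react': REC_TECH,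
--     'node': REC_TECH,
--     'design': REC_DESIGN, 'ui': REC_DESIGN, 'ux': REC_DESIGN, 'graphic': REC_DESIGN,
--     'creative': REC_DESIGN, 'art': REC_DESIGN, 'drawing': REC_DESIGN,
--     'photoshop': REC_DESIGN, 'illustrator': REC_DESIGN, 'sketch': REC_DESIGN,
--     'data': REC_DATA, 'analysis': REC_DATA, 'analytics': REC_DATA,
--     'statistics': REC_DATA, 'math': REC_DATA, 'excel': REC_DATA, 'sql': REC_DATA,
--     'database': REC_DATA, 'visualization': REC_DATA, 'tableau': REC_DATA, 'bi': REC_DATA,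
--     'marketing': REC_MARKETING, 'social media': REC_MARKETING, 'content': REC_MARKETING,
--     'writing': REC_MARKETING, 'seo': REC_MARKETING, 'advertising': REC_MARKETING,
--     'brand': REC_MARKETING, 'communication': REC_MARKETING,
--     'finance': REC_FINANCE, 'accounting': REC_FINANCE, 'economics': REC_FINANCE,
--     'investment': REC_FINANCE, 'banking': REC_FINANCE, 'stock': REC_FINANCE,
--     'market': REC_FINANCE, 'business': REC_FINANCE,
-- }
--
--
-- def generate_career_recommendation(skills, interests):
--     skills_lower = skills.lower()
--     interests_lower = interests.lower()
--
--     # Tags of every matched keyword, in map order (grouped tech..finance).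
--     hits = [rec for kw, rec in KEYWORD_REC.items()
--             if kw in skills_lower or kw in interests_lower]
--
--     if not hits:
--         return REC_GENERIC
--
--     # Mode of the tag list, first-seen tag winning ties.
--     best = hits[0]
--     for r in hits:
--         if hits.count(best) < hits.count(r):
--             best = r
--     return best
-- ===== Notes on version B (the rewrite author's own statement) =====
-- stated objective: alternative
-- what changed: Replaces the five per-category keyword lists, five sum-comprehensions, scores dict and max(scores, key=scores.get) with one flat keyword-to-recommendation map: B collects the recommendation tag of every matched keyword into one list and returns its mode (hand-rolled best-count scan, first-seen tag wins ties), with the generic message when no keyword matches.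
import Mathlib
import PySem

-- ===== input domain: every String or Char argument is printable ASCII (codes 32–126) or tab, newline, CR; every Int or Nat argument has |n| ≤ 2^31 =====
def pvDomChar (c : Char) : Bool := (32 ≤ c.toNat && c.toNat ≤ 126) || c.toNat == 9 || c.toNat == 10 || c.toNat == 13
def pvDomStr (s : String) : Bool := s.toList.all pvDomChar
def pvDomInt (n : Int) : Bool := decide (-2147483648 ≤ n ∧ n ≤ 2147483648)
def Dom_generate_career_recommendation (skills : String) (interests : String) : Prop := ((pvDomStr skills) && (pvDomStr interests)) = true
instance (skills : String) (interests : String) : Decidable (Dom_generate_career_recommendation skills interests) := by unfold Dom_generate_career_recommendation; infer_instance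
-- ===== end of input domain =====

-- B replaces the per-category keyword lists, score variables, scores dict and
-- max(scores, key=scores.get) with one flat keyword→recommendation map: it collects
-- the tag of every matched keyword and returns the mode of that tag list
-- (objective: alternative algorithm of similar cost).

-- ===== PORT A =====
-- shared text/data constants (identical literals in both Pythons)
def pvTechKw : List String := ["programming", "coding", "developer", "software", "web", "app", "python", "javascript", "java", "c++", "react", "node"]
def pvDesignKw : List String := ["design", "ui", "ux", "graphic", "creative", "art", "drawing", "photoshop", "illustrator", "sketch"]
def pvDataKw : List String := ["data", "analysis", "analytics", "statistics", "math", "excel", "sql", "database", "visualization", "tableau", "bi"]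
def pvMarketingKw : List String := ["marketing", "social media", "content", "writing", "seo", "advertising", "brand", "communication"]
def pvFinanceKw : List String := ["finance", "accounting", "economics", "investment", "banking", "stock", "market", "business"]
def pvRecTech : String := "Based on your skills and interests, you would excel in Software Development. Consider focusing on full-stack development to leverage your technical abilities."
def pvRecDesign : String := "Your creative skills suggest you would thrive in UX/UI Design. Consider building a portfolio showcasing your design thinking and visual communication skills."
def pvRecData : String := "Your analytical mindset makes Data Science an excellent career path. Consider developing expertise in machine learning and data visualization tools."
def pvRecMarketing : String := "Your communication skills align well with Digital Marketing. Consider specializing in content strategy or social media management."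
def pvRecFinance : String := "Your aptitude for numbers suggests a promising career in Financial Analysis. Consider pursuing certifications in financial planning or investment analysis."
def pvRecGeneric : String := "Based on your profile, consider exploring various fields to discover your passion. Start with short courses in different areas to find what resonates with you."

-- sum(1 for keyword in kws if keyword in skills_lower or keyword in interests_lower)
def pvScore (sl il : String) (kws : List String) : Int :=
  ((kws.filter (fun kw => PySem.Str.isIn kw sl || PySem.Str.isIn kw il)).map (fun _ => (1 : Int))).sum

def generate_career_recommendation (skills : String) (interests : String) : String :=
  let skills_lower := PySem.Str.lower skills
  let interests_lower := PySem.Str.lower interests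
  let tech_score := pvScore skills_lower interests_lower pvTechKw
  let design_score := pvScore skills_lower interests_lower pvDesignKw
  let data_score := pvScore skills_lower interests_lower pvDataKw
  let marketing_score := pvScore skills_lower interests_lower pvMarketingKw
  let finance_score := pvScore skills_lower interests_lower pvFinanceKw
  let scores : PySem.Dict String Int := PySem.Dict.mk
    [("tech", tech_score), ("design", design_score), ("data", data_score),
     ("marketing", marketing_score), ("finance", finance_score)]
  -- max(scores, key=scores.get): first key with maximal value; the dict is never empty
  let max_category := match PySem.List.max? scores.keys (fun k => scores.getD k 0) with
    | some c => c
    | none => ""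
  let recommendations : PySem.Dict String String := PySem.Dict.mk
    [("tech", pvRecTech), ("design", pvRecDesign), ("data", pvRecData),
     ("marketing", pvRecMarketing), ("finance", pvRecFinance)]
  if scores.getD max_category 0 == 0 then pvRecGeneric
  else recommendations.getD max_category ""   -- key always present, so getD is exact

-- ===== PORT B =====
-- KEYWORD_REC: Python dict literal with 49 distinct keys = association list in order
def pvKwRec : List (String × String) :=
  [
   ("programming", pvRecTech), ("coding", pvRecTech), ("developer", pvRecTech), ("software", pvRecTech), ("web", pvRecTech), ("app", pvRecTech), ("python", pvRecTech), ("javascript", pvRecTech), ("java", pvRecTech), ("c++", pvRecTech), ("react", pvRecTech), ("node", pvRecTech),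
   ("design", pvRecDesign), ("ui", pvRecDesign), ("ux", pvRecDesign), ("graphic", pvRecDesign), ("creative", pvRecDesign), ("art", pvRecDesign), ("drawing", pvRecDesign), ("photoshop", pvRecDesign), ("illustrator", pvRecDesign), ("sketch", pvRecDesign),
   ("data", pvRecData), ("analysis", pvRecData), ("analytics", pvRecData), ("statistics", pvRecData), ("math", pvRecData), ("excel", pvRecData), ("sql", pvRecData), ("database", pvRecData), ("visualization", pvRecData), ("tableau", pvRecData), ("bi", pvRecData),
   ("marketing", pvRecMarketing), ("social media", pvRecMarketing), ("content", pvRecMarketing), ("writing", pvRecMarketing), ("seo", pvRecMarketing), ("advertising", pvRecMarketing), ("brand", pvRecMarketing), ("communication", pvRecMarketing),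
   ("finance", pvRecFinance), ("accounting", pvRecFinance), ("economics", pvRecFinance), ("investment", pvRecFinance), ("banking", pvRecFinance), ("stock", pvRecFinance), ("market", pvRecFinance), ("business", pvRecFinance)]

def generate_career_recommendation_alt (skills : String) (interests : String) : String :=
  let skills_lower := PySem.Str.lower skills
  let interests_lower := PySem.Str.lower interests
  let hits := (pvKwRec.filter
      (fun e => PySem.Str.isIn e.1 skills_lower || PySem.Str.isIn e.1 interests_lower)).map
      (fun e => e.2)
  if hits = [] then pvRecGeneric
  else
    -- best = hits[0]; for r in hits: if hits.count(best) < hits.count(r): best = r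
    hits.foldl
      (fun best r => if PySem.List.count hits best < PySem.List.count hits r then r else best)
      (PySem.List.pyGetD hits 0 "")

-- ===== PRECONDITION & SPEC =====
def Spec_generate_career_recommendation (skills : String) (interests : String) (out : String) : Prop := out = generate_career_recommendation_alt skills interests
instance (skills : String) (interests : String) (out : String) : Decidable (Spec_generate_career_recommendation skills interests out) := by unfold Spec_generate_career_recommendation; infer_instance

-- ===== CLAIM (what is proved, stated in full; the proofs are below) =====
def Claim_equal_generate_career_recommendation : Prop := ∀ (skills : String) (interests : String), Dom_generate_career_recommendation skills interests → Spec_generate_career_recommendation skills interests (generate_career_recommendation skills interests)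

-- ===== LEMMAS AND PROOFS =====
theorem pvScore_nonneg (sl il : String) (kws : List String) : 0 ≤ pvScore sl il kws := by
  unfold pvScore
  induction kws.filter (fun kw => PySem.Str.isIn kw sl || PySem.Str.isIn kw il) with
  | nil => simp
  | cons h t ih => simp only [List.map_cons, List.sum_cons]; omega

theorem pvScore_len (sl il : String) (kws : List String) :
    pvScore sl il kws
      = (((kws.filter (fun kw => PySem.Str.isIn kw sl || PySem.Str.isIn kw il)).length : Nat) : Int) := by
  unfold pvScore
  induction kws.filter (fun kw => PySem.Str.isIn kw sl || PySem.Str.isIn kw il) with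
  | nil => simp
  | cons h t ih => simp only [List.map_cons, List.sum_cons, List.length_cons, ih]; push_cast; ring

-- the matched tags of one keyword block are a replicate of its recommendation
theorem pvBlock (sl il r : String) (kws : List String) :
    (((kws.map (fun kw => (kw, r))).filter
        (fun e => PySem.Str.isIn e.1 sl || PySem.Str.isIn e.1 il)).map (fun e => e.2))
      = List.replicate (kws.filter (fun kw => PySem.Str.isIn kw sl || PySem.Str.isIn kw il)).length r := by
  induction kws with
  | nil => simp
  | cons k t ih =>
    simp only [List.map_cons, List.filter_cons]
    by_cases h : (PySem.Str.isIn k sl || PySem.Str.isIn k il) = true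
    · rw [if_pos (by exact h), if_pos (by exact h)]
      simp only [List.map_cons, ih, List.length_cons, List.replicate_succ]
    · rw [if_neg (by exact h), if_neg (by exact h)]
      exact ih

-- the flat keyword map is the five blocks in category order
theorem pvKwRec_eq :
    pvKwRec = pvTechKw.map (fun kw => (kw, pvRecTech))
      ++ pvDesignKw.map (fun kw => (kw, pvRecDesign))
      ++ pvDataKw.map (fun kw => (kw, pvRecData))
      ++ pvMarketingKw.map (fun kw => (kw, pvRecMarketing))
      ++ pvFinanceKw.map (fun kw => (kw, pvRecFinance)) := by rfl

-- proof-only shape of the hits list: one replicate per category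
def pvHits (t d da m f : Nat) : List String :=
  List.replicate t pvRecTech ++ List.replicate d pvRecDesign ++ List.replicate da pvRecData
    ++ List.replicate m pvRecMarketing ++ List.replicate f pvRecFinance

theorem pvHits_eq (sl il : String) :
    ((pvKwRec.filter (fun e => PySem.Str.isIn e.1 sl || PySem.Str.isIn e.1 il)).map (fun e => e.2))
      = pvHits (pvTechKw.filter (fun kw => PySem.Str.isIn kw sl || PySem.Str.isIn kw il)).length
          (pvDesignKw.filter (fun kw => PySem.Str.isIn kw sl || PySem.Str.isIn kw il)).length
          (pvDataKw.filter (fun kw => PySem.Str.isIn kw sl || PySem.Str.isIn kw il)).length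
          (pvMarketingKw.filter (fun kw => PySem.Str.isIn kw sl || PySem.Str.isIn kw il)).length
          (pvFinanceKw.filter (fun kw => PySem.Str.isIn kw sl || PySem.Str.isIn kw il)).length := by
  rw [pvKwRec_eq]
  simp only [List.filter_append, List.map_append, pvBlock, pvHits]

-- counts of each tag in the hits list
theorem pvCountT (t d da m f : Nat) : PySem.List.count (pvHits t d da m f) pvRecTech = t := by
  simp [pvHits, PySem.List.count, List.count_append, List.count_replicate,
    pvRecTech, pvRecDesign, pvRecData, pvRecMarketing, pvRecFinance]
theorem pvCountD (t d da m f : Nat) : PySem.List.count (pvHits t d da m f) pvRecDesign = d := by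
  simp [pvHits, PySem.List.count, List.count_append, List.count_replicate,
    pvRecTech, pvRecDesign, pvRecData, pvRecMarketing, pvRecFinance]
theorem pvCountDa (t d da m f : Nat) : PySem.List.count (pvHits t d da m f) pvRecData = da := by
  simp [pvHits, PySem.List.count, List.count_append, List.count_replicate,
    pvRecTech, pvRecDesign, pvRecData, pvRecMarketing, pvRecFinance]
theorem pvCountM (t d da m f : Nat) : PySem.List.count (pvHits t d da m f) pvRecMarketing = m := by
  simp [pvHits, PySem.List.count, List.count_append, List.count_replicate,
    pvRecTech, pvRecDesign, pvRecData, pvRecMarketing, pvRecFinance]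
theorem pvCountF (t d da m f : Nat) : PySem.List.count (pvHits t d da m f) pvRecFinance = f := by
  simp [pvHits, PySem.List.count, List.count_append, List.count_replicate,
    pvRecTech, pvRecDesign, pvRecData, pvRecMarketing, pvRecFinance]

-- B's best-count scan over a block of equal tags
theorem pvFoldRep (k : String → Nat) (x : String) :
    ∀ (n : Nat) (m : String),
      (List.replicate n x).foldl (fun best r => if k best < k r then r else best) m
        = if 0 < n ∧ k m < k x then x else m := by
  intro n
  induction n with
  | zero => intro m; simp
  | succ n ih =>
    intro m
    simp only [List.replicate_succ, List.foldl_cons]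
    by_cases h : k m < k x
    · rw [if_pos h, ih x]
      simp [h]
    · rw [if_neg h, ih m]
      simp [h]

-- B's mode scan over replicate blocks matches the strict-max fold over (count, tag)
-- pairs, provided the key gives each block its count
theorem pvGen (k : String → Nat) :
    ∀ (L : List (Nat × String)) (b : String), (∀ e ∈ L, k e.2 = e.1) →
      ((L.map (fun e => ((e.1 : Int), e.2))).foldl
          (fun best e => if best.1 < e.1 then e else best) (((k b : Nat) : Int), b))
        = (((k ((L.flatMap (fun e => List.replicate e.1 e.2)).foldl
                (fun best r => if k best < k r then r else best) b) : Nat) : Int),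
            ((L.flatMap (fun e => List.replicate e.1 e.2)).foldl
                (fun best r => if k best < k r then r else best) b)) := by
  intro L
  induction L with
  | nil => intro b _; simp
  | cons e L ih =>
    intro b hk
    obtain ⟨n, s⟩ := e
    have hs : k s = n := hk (n, s) (by simp)
    have hkL : ∀ e ∈ L, k e.2 = e.1 := fun e he => hk e (by simp [he])
    simp only [List.map_cons, List.foldl_cons, List.flatMap_cons, List.foldl_append, pvFoldRep]
    by_cases h : k b < n
    · have hc : 0 < n ∧ k b < k s := ⟨by omega, by rw [hs]; exact h⟩
      rw [if_pos hc, if_pos (by exact_mod_cast h)]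
      have := ih s hkL
      rw [← hs]
      exact this
    · have hc : ¬ (0 < n ∧ k b < k s) := by rw [hs]; omega
      rw [if_neg hc, if_neg (by exact_mod_cast h)]
      exact ih b hkL

-- one step of A's selection fold consuming the first (count, tag) entry
theorem pvCase (k : String → Nat) (t : Nat) (s : String) (L : List (Nat × String))
    (hk : ∀ e ∈ L, k e.2 = e.1) :
    ((List.replicate t s ++ L.flatMap (fun e => List.replicate e.1 e.2)).foldl
        (fun best r => if k best < k r then r else best) s)
      = ((L.map (fun e => ((e.1 : Int), e.2))).foldl
          (fun best e => if best.1 < e.1 then e else best) (((k s : Nat) : Int), s)).2 := by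
  rw [List.foldl_append, pvFoldRep]
  rw [if_neg (by simp)]
  rw [pvGen k L s hk]

-- B's mode scan equals A's strict-max fold over the five (score, recommendation) pairs
theorem pvBridge (t d da m f : Nat) :
    (if pvHits t d da m f = [] then pvRecGeneric
     else (pvHits t d da m f).foldl
        (fun best r => if PySem.List.count (pvHits t d da m f) best < PySem.List.count (pvHits t d da m f) r then r else best)
        (PySem.List.pyGetD (pvHits t d da m f) 0 ""))
      = ([((t : Int), pvRecTech), ((d : Int), pvRecDesign), ((da : Int), pvRecData),
          ((m : Int), pvRecMarketing), ((f : Int), pvRecFinance)].foldl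
            (fun best e => if best.1 < e.1 then e else best) ((0 : Int), pvRecGeneric)).2 := by
  cases t with
  | succ n =>
    have hne : pvHits (n+1) d da m f ≠ [] := by simp [pvHits]
    rw [if_neg hne]
    have hhead : PySem.List.pyGetD (pvHits (n+1) d da m f) 0 "" = pvRecTech := by
      simp [pvHits, List.replicate_succ]
    rw [hhead]
    set c : String → Nat := PySem.List.count (pvHits (n+1) d da m f)
    have hsplit : pvHits (n+1) d da m f
        = List.replicate (n+1) pvRecTech
          ++ ([(d, pvRecDesign), (da, pvRecData), (m, pvRecMarketing), (f, pvRecFinance)].flatMap (fun e => List.replicate e.1 e.2)) := by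
      simp [pvHits, List.flatMap_cons]
    have hk : ∀ e ∈ [(d, pvRecDesign), (da, pvRecData), (m, pvRecMarketing), (f, pvRecFinance)], c e.2 = e.1 := by
      intro e he
      fin_cases he
      · exact pvCountD _ _ _ _ _
      · exact pvCountDa _ _ _ _ _
      · exact pvCountM _ _ _ _ _
      · exact pvCountF _ _ _ _ _
    rw [hsplit, pvCase c (n+1) pvRecTech _ hk]
    have hcnt : c pvRecTech = n + 1 := pvCountT _ _ _ _ _
    rw [hcnt]
    simp
  | zero =>
    cases d with
    | succ n =>
      have hne : pvHits 0 (n+1) da m f ≠ [] := by simp [pvHits]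
      rw [if_neg hne]
      have hhead : PySem.List.pyGetD (pvHits 0 (n+1) da m f) 0 "" = pvRecDesign := by
        simp [pvHits, List.replicate_succ]
      rw [hhead]
      set c : String → Nat := PySem.List.count (pvHits 0 (n+1) da m f)
      have hsplit : pvHits 0 (n+1) da m f
          = List.replicate (n+1) pvRecDesign
            ++ ([(da, pvRecData), (m, pvRecMarketing), (f, pvRecFinance)].flatMap (fun e => List.replicate e.1 e.2)) := by
        simp [pvHits, List.flatMap_cons]
      have hk : ∀ e ∈ [(da, pvRecData), (m, pvRecMarketing), (f, pvRecFinance)], c e.2 = e.1 := by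
        intro e he
        fin_cases he
        · exact pvCountDa _ _ _ _ _
        · exact pvCountM _ _ _ _ _
        · exact pvCountF _ _ _ _ _
      rw [hsplit, pvCase c (n+1) pvRecDesign _ hk]
      have hcnt : c pvRecDesign = n + 1 := pvCountD _ _ _ _ _
      rw [hcnt]
      simp
    | zero =>
      cases da with
      | succ n =>
        have hne : pvHits 0 0 (n+1) m f ≠ [] := by simp [pvHits]
        rw [if_neg hne]
        have hhead : PySem.List.pyGetD (pvHits 0 0 (n+1) m f) 0 "" = pvRecData := by
          simp [pvHits, List.replicate_succ]
        rw [hhead]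
        set c : String → Nat := PySem.List.count (pvHits 0 0 (n+1) m f)
        have hsplit : pvHits 0 0 (n+1) m f
            = List.replicate (n+1) pvRecData
              ++ ([(m, pvRecMarketing), (f, pvRecFinance)].flatMap (fun e => List.replicate e.1 e.2)) := by
          simp [pvHits, List.flatMap_cons]
        have hk : ∀ e ∈ [(m, pvRecMarketing), (f, pvRecFinance)], c e.2 = e.1 := by
          intro e he
          fin_cases he
          · exact pvCountM _ _ _ _ _
          · exact pvCountF _ _ _ _ _
        rw [hsplit, pvCase c (n+1) pvRecData _ hk]
        have hcnt : c pvRecData = n + 1 := pvCountDa _ _ _ _ _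
        rw [hcnt]
        simp
      | zero =>
        cases m with
        | succ n =>
          have hne : pvHits 0 0 0 (n+1) f ≠ [] := by simp [pvHits]
          rw [if_neg hne]
          have hhead : PySem.List.pyGetD (pvHits 0 0 0 (n+1) f) 0 "" = pvRecMarketing := by
            simp [pvHits, List.replicate_succ]
          rw [hhead]
          set c : String → Nat := PySem.List.count (pvHits 0 0 0 (n+1) f)
          have hsplit : pvHits 0 0 0 (n+1) f
              = List.replicate (n+1) pvRecMarketing
                ++ ([(f, pvRecFinance)].flatMap (fun e => List.replicate e.1 e.2)) := by
            simp [pvHits, List.flatMap_cons]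
          have hk : ∀ e ∈ [(f, pvRecFinance)], c e.2 = e.1 := by
            intro e he
            fin_cases he
            · exact pvCountF _ _ _ _ _
          rw [hsplit, pvCase c (n+1) pvRecMarketing _ hk]
          have hcnt : c pvRecMarketing = n + 1 := pvCountM _ _ _ _ _
          rw [hcnt]
          simp
        | zero =>
          cases f with
          | succ n =>
            have hne : pvHits 0 0 0 0 (n+1) ≠ [] := by simp [pvHits]
            rw [if_neg hne]
            have hhead : PySem.List.pyGetD (pvHits 0 0 0 0 (n+1)) 0 "" = pvRecFinance := by
              simp [pvHits, List.replicate_succ]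
            rw [hhead]
            set c : String → Nat := PySem.List.count (pvHits 0 0 0 0 (n+1))
            have hsplit : pvHits 0 0 0 0 (n+1)
                = List.replicate (n+1) pvRecFinance
                  ++ (([] : List (Nat × String)).flatMap (fun e => List.replicate e.1 e.2)) := by
              simp [pvHits]
            have hk : ∀ e ∈ ([] : List (Nat × String)), c e.2 = e.1 := by
              intro e he
              fin_cases he
            rw [hsplit, pvCase c (n+1) pvRecFinance _ hk]
            have hcnt : c pvRecFinance = n + 1 := pvCountF _ _ _ _ _
            rw [hcnt]
            simp
          | zero =>
            simp [pvHits]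

theorem g1 (t d da m_ f : Int) : (PySem.Dict.mk [("tech", t), ("design", d), ("data", da), ("marketing", m_), ("finance", f)]).getD "tech" 0 = t := by
  simp [PySem.Dict.getD_eq_get?_getD, PySem.Dict.get?_mk_cons]
theorem g2 (t d da m_ f : Int) : (PySem.Dict.mk [("tech", t), ("design", d), ("data", da), ("marketing", m_), ("finance", f)]).getD "design" 0 = d := by
  simp [PySem.Dict.getD_eq_get?_getD, PySem.Dict.get?_mk_cons]
theorem g3 (t d da m_ f : Int) : (PySem.Dict.mk [("tech", t), ("design", d), ("data", da), ("marketing", m_), ("finance", f)]).getD "data" 0 = da := by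
  simp [PySem.Dict.getD_eq_get?_getD, PySem.Dict.get?_mk_cons]
theorem g4 (t d da m_ f : Int) : (PySem.Dict.mk [("tech", t), ("design", d), ("data", da), ("marketing", m_), ("finance", f)]).getD "marketing" 0 = m_ := by
  simp [PySem.Dict.getD_eq_get?_getD, PySem.Dict.get?_mk_cons]
theorem g5 (t d da m_ f : Int) : (PySem.Dict.mk [("tech", t), ("design", d), ("data", da), ("marketing", m_), ("finance", f)]).getD "finance" 0 = f := by
  simp [PySem.Dict.getD_eq_get?_getD, PySem.Dict.get?_mk_cons]
theorem gr1 : (PySem.Dict.mk [("tech", pvRecTech), ("design", pvRecDesign), ("data", pvRecData), ("marketing", pvRecMarketing), ("finance", pvRecFinance)]).getD "tech" "" = pvRecTech := by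
  simp [PySem.Dict.getD_eq_get?_getD, PySem.Dict.get?_mk_cons]
theorem gr2 : (PySem.Dict.mk [("tech", pvRecTech), ("design", pvRecDesign), ("data", pvRecData), ("marketing", pvRecMarketing), ("finance", pvRecFinance)]).getD "design" "" = pvRecDesign := by
  simp [PySem.Dict.getD_eq_get?_getD, PySem.Dict.get?_mk_cons]
theorem gr3 : (PySem.Dict.mk [("tech", pvRecTech), ("design", pvRecDesign), ("data", pvRecData), ("marketing", pvRecMarketing), ("finance", pvRecFinance)]).getD "data" "" = pvRecData := by
  simp [PySem.Dict.getD_eq_get?_getD, PySem.Dict.get?_mk_cons]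
theorem gr4 : (PySem.Dict.mk [("tech", pvRecTech), ("design", pvRecDesign), ("data", pvRecData), ("marketing", pvRecMarketing), ("finance", pvRecFinance)]).getD "marketing" "" = pvRecMarketing := by
  simp [PySem.Dict.getD_eq_get?_getD, PySem.Dict.get?_mk_cons]
theorem gr5 : (PySem.Dict.mk [("tech", pvRecTech), ("design", pvRecDesign), ("data", pvRecData), ("marketing", pvRecMarketing), ("finance", pvRecFinance)]).getD "finance" "" = pvRecFinance := by
  simp [PySem.Dict.getD_eq_get?_getD, PySem.Dict.get?_mk_cons]

-- A's dict/max selection agrees with the strict-max fold, for any nonnegative scores.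
set_option maxHeartbeats 4000000 in
theorem pv_select_eq (t d da m_ f : Int) (ht : 0 ≤ t) (hd : 0 ≤ d) (hda : 0 ≤ da)
    (hm : 0 ≤ m_) (hf : 0 ≤ f) :
    (let scores : PySem.Dict String Int := PySem.Dict.mk
        [("tech", t), ("design", d), ("data", da), ("marketing", m_), ("finance", f)]
     let max_category := match PySem.List.max? scores.keys (fun k => scores.getD k 0) with
       | some c => c
       | none => ""
     let recommendations : PySem.Dict String String := PySem.Dict.mk
        [("tech", pvRecTech), ("design", pvRecDesign), ("data", pvRecData),
         ("marketing", pvRecMarketing), ("finance", pvRecFinance)]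
     if scores.getD max_category 0 == 0 then pvRecGeneric
     else recommendations.getD max_category "")
    =
    ([((t : Int), pvRecTech), (d, pvRecDesign), (da, pvRecData),
      (m_, pvRecMarketing), (f, pvRecFinance)].foldl
       (fun best e => if best.1 < e.1 then e else best) ((0 : Int), pvRecGeneric)).2 := by
  simp only [PySem.List.max?, PySem.Dict.keys_mk, List.map_cons, List.map_nil, List.foldl, g1, g2, g3, g4, g5, beq_iff_eq]
  by_cases h0 : (0:Int) < t
  ·
    by_cases h1 : (t:Int) < d
    · try simp [PySem.List.max?, PySem.Dict.keys_mk, List.foldl, g1, g2, g3, g4, g5, h0, h1]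
      by_cases h2 : (d:Int) < da
      · try simp [PySem.List.max?, PySem.Dict.keys_mk, List.foldl, g1, g2, g3, g4, g5, h0, h1, h2]
        by_cases h3 : (da:Int) < m_
        · try simp [PySem.List.max?, PySem.Dict.keys_mk, List.foldl, g1, g2, g3, g4, g5, h0, h1, h2, h3]
          by_cases h4 : (m_:Int) < f
          · try simp [PySem.List.max?, PySem.Dict.keys_mk, List.foldl, g1, g2, g3, g4, g5, h0, h1, h2, h3, h4]
            have hnz : ¬(f = (0:Int)) := by omega
            try simp [hnz, gr1, gr2, gr3, gr4, gr5, h0, h1, h2, h3, h4]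
          · try simp [PySem.List.max?, PySem.Dict.keys_mk, List.foldl, g1, g2, g3, g4, g5, h0, h1, h2, h3, h4]
            have hnz : ¬(m_ = (0:Int)) := by omega
            try simp [hnz, gr1, gr2, gr3, gr4, gr5, h0, h1, h2, h3, h4]
        · try simp [PySem.List.max?, PySem.Dict.keys_mk, List.foldl, g1, g2, g3, g4, g5, h0, h1, h2, h3]
          by_cases h5 : (da:Int) < f
          · try simp [PySem.List.max?, PySem.Dict.keys_mk, List.foldl, g1, g2, g3, g4, g5, h0, h1, h2, h3, h5]
            have hnz : ¬(f = (0:Int)) := by omega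
            try simp [hnz, gr1, gr2, gr3, gr4, gr5, h0, h1, h2, h3, h5]
          · try simp [PySem.List.max?, PySem.Dict.keys_mk, List.foldl, g1, g2, g3, g4, g5, h0, h1, h2, h3, h5]
            have hnz : ¬(da = (0:Int)) := by omega
            try simp [hnz, gr1, gr2, gr3, gr4, gr5, h0, h1, h2, h3, h5]
      · try simp [PySem.List.max?, PySem.Dict.keys_mk, List.foldl, g1, g2, g3, g4, g5, h0, h1, h2]
        by_cases h6 : (d:Int) < m_
        · try simp [PySem.List.max?, PySem.Dict.keys_mk, List.foldl, g1, g2, g3, g4, g5, h0, h1, h2, h6]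
          by_cases h7 : (m_:Int) < f
          · try simp [PySem.List.max?, PySem.Dict.keys_mk, List.foldl, g1, g2, g3, g4, g5, h0, h1, h2, h6, h7]
            have hnz : ¬(f = (0:Int)) := by omega
            try simp [hnz, gr1, gr2, gr3, gr4, gr5, h0, h1, h2, h6, h7]
          · try simp [PySem.List.max?, PySem.Dict.keys_mk, List.foldl, g1, g2, g3, g4, g5, h0, h1, h2, h6, h7]
            have hnz : ¬(m_ = (0:Int)) := by omega
            try simp [hnz, gr1, gr2, gr3, gr4, gr5, h0, h1, h2, h6, h7]
        · try simp [PySem.List.max?, PySem.Dict.keys_mk, List.foldl, g1, g2, g3, g4, g5, h0, h1, h2, h6]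
          by_cases h8 : (d:Int) < f
          · try simp [PySem.List.max?, PySem.Dict.keys_mk, List.foldl, g1, g2, g3, g4, g5, h0, h1, h2, h6, h8]
            have hnz : ¬(f = (0:Int)) := by omega
            try simp [hnz, gr1, gr2, gr3, gr4, gr5, h0, h1, h2, h6, h8]
          · try simp [PySem.List.max?, PySem.Dict.keys_mk, List.foldl, g1, g2, g3, g4, g5, h0, h1, h2, h6, h8]
            have hnz : ¬(d = (0:Int)) := by omega
            try simp [hnz, gr1, gr2, gr3, gr4, gr5, h0, h1, h2, h6, h8]
    · try simp [PySem.List.max?, PySem.Dict.keys_mk, List.foldl, g1, g2, g3, g4, g5, h0, h1]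
      by_cases h9 : (t:Int) < da
      · try simp [PySem.List.max?, PySem.Dict.keys_mk, List.foldl, g1, g2, g3, g4, g5, h0, h1, h9]
        by_cases h10 : (da:Int) < m_
        · try simp [PySem.List.max?, PySem.Dict.keys_mk, List.foldl, g1, g2, g3, g4, g5, h0, h1, h9, h10]
          by_cases h11 : (m_:Int) < f
          · try simp [PySem.List.max?, PySem.Dict.keys_mk, List.foldl, g1, g2, g3, g4, g5, h0, h1, h9, h10, h11]
            have hnz : ¬(f = (0:Int)) := by omega
            try simp [hnz, gr1, gr2, gr3, gr4, gr5, h0, h1, h9, h10, h11]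
          · try simp [PySem.List.max?, PySem.Dict.keys_mk, List.foldl, g1, g2, g3, g4, g5, h0, h1, h9, h10, h11]
            have hnz : ¬(m_ = (0:Int)) := by omega
            try simp [hnz, gr1, gr2, gr3, gr4, gr5, h0, h1, h9, h10, h11]
        · try simp [PySem.List.max?, PySem.Dict.keys_mk, List.foldl, g1, g2, g3, g4, g5, h0, h1, h9, h10]
          by_cases h12 : (da:Int) < f
          · try simp [PySem.List.max?, PySem.Dict.keys_mk, List.foldl, g1, g2, g3, g4, g5, h0, h1, h9, h10, h12]
            have hnz : ¬(f = (0:Int)) := by omega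
            try simp [hnz, gr1, gr2, gr3, gr4, gr5, h0, h1, h9, h10, h12]
          · try simp [PySem.List.max?, PySem.Dict.keys_mk, List.foldl, g1, g2, g3, g4, g5, h0, h1, h9, h10, h12]
            have hnz : ¬(da = (0:Int)) := by omega
            try simp [hnz, gr1, gr2, gr3, gr4, gr5, h0, h1, h9, h10, h12]
      · try simp [PySem.List.max?, PySem.Dict.keys_mk, List.foldl, g1, g2, g3, g4, g5, h0, h1, h9]
        by_cases h13 : (t:Int) < m_
        · try simp [PySem.List.max?, PySem.Dict.keys_mk, List.foldl, g1, g2, g3, g4, g5, h0, h1, h9, h13]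
          by_cases h14 : (m_:Int) < f
          · try simp [PySem.List.max?, PySem.Dict.keys_mk, List.foldl, g1, g2, g3, g4, g5, h0, h1, h9, h13, h14]
            have hnz : ¬(f = (0:Int)) := by omega
            try simp [hnz, gr1, gr2, gr3, gr4, gr5, h0, h1, h9, h13, h14]
          · try simp [PySem.List.max?, PySem.Dict.keys_mk, List.foldl, g1, g2, g3, g4, g5, h0, h1, h9, h13, h14]
            have hnz : ¬(m_ = (0:Int)) := by omega
            try simp [hnz, gr1, gr2, gr3, gr4, gr5, h0, h1, h9, h13, h14]
        · try simp [PySem.List.max?, PySem.Dict.keys_mk, List.foldl, g1, g2, g3, g4, g5, h0, h1, h9, h13]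
          by_cases h15 : (t:Int) < f
          · try simp [PySem.List.max?, PySem.Dict.keys_mk, List.foldl, g1, g2, g3, g4, g5, h0, h1, h9, h13, h15]
            have hnz : ¬(f = (0:Int)) := by omega
            try simp [hnz, gr1, gr2, gr3, gr4, gr5, h0, h1, h9, h13, h15]
          · try simp [PySem.List.max?, PySem.Dict.keys_mk, List.foldl, g1, g2, g3, g4, g5, h0, h1, h9, h13, h15]
            have hnz : ¬(t = (0:Int)) := by omega
            try simp [hnz, gr1, gr2, gr3, gr4, gr5, h0, h1, h9, h13, h15]
  · have ht0 : t = 0 := by omega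
    subst ht0
    by_cases h1 : (0:Int) < d
    · try simp [PySem.List.max?, PySem.Dict.keys_mk, List.foldl, g1, g2, g3, g4, g5, h0, h1]
      by_cases h2 : (d:Int) < da
      · try simp [PySem.List.max?, PySem.Dict.keys_mk, List.foldl, g1, g2, g3, g4, g5, h0, h1, h2]
        by_cases h3 : (da:Int) < m_
        · try simp [PySem.List.max?, PySem.Dict.keys_mk, List.foldl, g1, g2, g3, g4, g5, h0, h1, h2, h3]
          by_cases h4 : (m_:Int) < f
          · try simp [PySem.List.max?, PySem.Dict.keys_mk, List.foldl, g1, g2, g3, g4, g5, h0, h1, h2, h3, h4]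
            have hnz : ¬(f = (0:Int)) := by omega
            try simp [hnz, gr1, gr2, gr3, gr4, gr5, h0, h1, h2, h3, h4]
          · try simp [PySem.List.max?, PySem.Dict.keys_mk, List.foldl, g1, g2, g3, g4, g5, h0, h1, h2, h3, h4]
            have hnz : ¬(m_ = (0:Int)) := by omega
            try simp [hnz, gr1, gr2, gr3, gr4, gr5, h0, h1, h2, h3, h4]
        · try simp [PySem.List.max?, PySem.Dict.keys_mk, List.foldl, g1, g2, g3, g4, g5, h0, h1, h2, h3]
          by_cases h5 : (da:Int) < f
          · try simp [PySem.List.max?, PySem.Dict.keys_mk, List.foldl, g1, g2, g3, g4, g5, h0, h1, h2, h3, h5]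
            have hnz : ¬(f = (0:Int)) := by omega
            try simp [hnz, gr1, gr2, gr3, gr4, gr5, h0, h1, h2, h3, h5]
          · try simp [PySem.List.max?, PySem.Dict.keys_mk, List.foldl, g1, g2, g3, g4, g5, h0, h1, h2, h3, h5]
            have hnz : ¬(da = (0:Int)) := by omega
            try simp [hnz, gr1, gr2, gr3, gr4, gr5, h0, h1, h2, h3, h5]
      · try simp [PySem.List.max?, PySem.Dict.keys_mk, List.foldl, g1, g2, g3, g4, g5, h0, h1, h2]
        by_cases h6 : (d:Int) < m_
        · try simp [PySem.List.max?, PySem.Dict.keys_mk, List.foldl, g1, g2, g3, g4, g5, h0, h1, h2, h6]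
          by_cases h7 : (m_:Int) < f
          · try simp [PySem.List.max?, PySem.Dict.keys_mk, List.foldl, g1, g2, g3, g4, g5, h0, h1, h2, h6, h7]
            have hnz : ¬(f = (0:Int)) := by omega
            try simp [hnz, gr1, gr2, gr3, gr4, gr5, h0, h1, h2, h6, h7]
          · try simp [PySem.List.max?, PySem.Dict.keys_mk, List.foldl, g1, g2, g3, g4, g5, h0, h1, h2, h6, h7]
            have hnz : ¬(m_ = (0:Int)) := by omega
            try simp [hnz, gr1, gr2, gr3, gr4, gr5, h0, h1, h2, h6, h7]
        · try simp [PySem.List.max?, PySem.Dict.keys_mk, List.foldl, g1, g2, g3, g4, g5, h0, h1, h2, h6]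
          by_cases h8 : (d:Int) < f
          · try simp [PySem.List.max?, PySem.Dict.keys_mk, List.foldl, g1, g2, g3, g4, g5, h0, h1, h2, h6, h8]
            have hnz : ¬(f = (0:Int)) := by omega
            try simp [hnz, gr1, gr2, gr3, gr4, gr5, h0, h1, h2, h6, h8]
          · try simp [PySem.List.max?, PySem.Dict.keys_mk, List.foldl, g1, g2, g3, g4, g5, h0, h1, h2, h6, h8]
            have hnz : ¬(d = (0:Int)) := by omega
            try simp [hnz, gr1, gr2, gr3, gr4, gr5, h0, h1, h2, h6, h8]
    · try simp [PySem.List.max?, PySem.Dict.keys_mk, List.foldl, g1, g2, g3, g4, g5, h0, h1]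
      by_cases h9 : (0:Int) < da
      · try simp [PySem.List.max?, PySem.Dict.keys_mk, List.foldl, g1, g2, g3, g4, g5, h0, h1, h9]
        by_cases h10 : (da:Int) < m_
        · try simp [PySem.List.max?, PySem.Dict.keys_mk, List.foldl, g1, g2, g3, g4, g5, h0, h1, h9, h10]
          by_cases h11 : (m_:Int) < f
          · try simp [PySem.List.max?, PySem.Dict.keys_mk, List.foldl, g1, g2, g3, g4, g5, h0, h1, h9, h10, h11]
            have hnz : ¬(f = (0:Int)) := by omega
            try simp [hnz, gr1, gr2, gr3, gr4, gr5, h0, h1, h9, h10, h11]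
          · try simp [PySem.List.max?, PySem.Dict.keys_mk, List.foldl, g1, g2, g3, g4, g5, h0, h1, h9, h10, h11]
            have hnz : ¬(m_ = (0:Int)) := by omega
            try simp [hnz, gr1, gr2, gr3, gr4, gr5, h0, h1, h9, h10, h11]
        · try simp [PySem.List.max?, PySem.Dict.keys_mk, List.foldl, g1, g2, g3, g4, g5, h0, h1, h9, h10]
          by_cases h12 : (da:Int) < f
          · try simp [PySem.List.max?, PySem.Dict.keys_mk, List.foldl, g1, g2, g3, g4, g5, h0, h1, h9, h10, h12]
            have hnz : ¬(f = (0:Int)) := by omega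
            try simp [hnz, gr1, gr2, gr3, gr4, gr5, h0, h1, h9, h10, h12]
          · try simp [PySem.List.max?, PySem.Dict.keys_mk, List.foldl, g1, g2, g3, g4, g5, h0, h1, h9, h10, h12]
            have hnz : ¬(da = (0:Int)) := by omega
            try simp [hnz, gr1, gr2, gr3, gr4, gr5, h0, h1, h9, h10, h12]
      · try simp [PySem.List.max?, PySem.Dict.keys_mk, List.foldl, g1, g2, g3, g4, g5, h0, h1, h9]
        by_cases h13 : (0:Int) < m_
        · try simp [PySem.List.max?, PySem.Dict.keys_mk, List.foldl, g1, g2, g3, g4, g5, h0, h1, h9, h13]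
          by_cases h14 : (m_:Int) < f
          · try simp [PySem.List.max?, PySem.Dict.keys_mk, List.foldl, g1, g2, g3, g4, g5, h0, h1, h9, h13, h14]
            have hnz : ¬(f = (0:Int)) := by omega
            try simp [hnz, gr1, gr2, gr3, gr4, gr5, h0, h1, h9, h13, h14]
          · try simp [PySem.List.max?, PySem.Dict.keys_mk, List.foldl, g1, g2, g3, g4, g5, h0, h1, h9, h13, h14]
            have hnz : ¬(m_ = (0:Int)) := by omega
            try simp [hnz, gr1, gr2, gr3, gr4, gr5, h0, h1, h9, h13, h14]
        · try simp [PySem.List.max?, PySem.Dict.keys_mk, List.foldl, g1, g2, g3, g4, g5, h0, h1, h9, h13]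
          by_cases h15 : (0:Int) < f
          · try simp [PySem.List.max?, PySem.Dict.keys_mk, List.foldl, g1, g2, g3, g4, g5, h0, h1, h9, h13, h15]
            have hnz : ¬(f = (0:Int)) := by omega
            try simp [hnz, gr1, gr2, gr3, gr4, gr5, h0, h1, h9, h13, h15]
          · try simp [PySem.List.max?, PySem.Dict.keys_mk, List.foldl, g1, g2, g3, g4, g5, h0, h1, h9, h13, h15]
            try simp

-- ===== VERDICT (by name: the statement is the Claim_ definition above) =====
set_option maxHeartbeats 2000000 in
theorem generate_career_recommendation_spec : Claim_equal_generate_career_recommendation := by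
  intro skills interests _
  unfold Spec_generate_career_recommendation
  unfold generate_career_recommendation generate_career_recommendation_alt
  refine Eq.trans
    (pv_select_eq _ _ _ _ _ (pvScore_nonneg _ _ _) (pvScore_nonneg _ _ _) (pvScore_nonneg _ _ _)
      (pvScore_nonneg _ _ _) (pvScore_nonneg _ _ _)) ?_
  simp only [pvScore_len, pvHits_eq]
  exact (pvBridge _ _ _ _ _).symm
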